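-- pv_equiv track=rewrite | github.com/FranRovi/Algorithms | Leet_Code/Easy/trimTrailingVowels.py | trimTrailingsVowels
-- ===== SOURCE A (Python) =====
-- def trimTrailingsVowels(s):
--     vowels = {"a","e","i","o","u"}
--     s_list = list(s)
--     for i in range(len(s_list)-1,-1,-1):
--         if s_list[i] in vowels:
--             s_list.pop(i)
--         else:
--             break
--     return "".join(s_list)
-- ===== SOURCE B (Python) =====
-- def trimTrailingsVowels(s):
--     return s.rstrip("aeiou")
-- ===== Notes on version B (the rewrite author's own statement) =====
-- stated objective: idiomatic
-- what changed: Replaces the backward index loop that pops characters one at a time from a list copy with a single str.rstrip("aeiou") call that strips the trailing lowercase vowels.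
import Mathlib
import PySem

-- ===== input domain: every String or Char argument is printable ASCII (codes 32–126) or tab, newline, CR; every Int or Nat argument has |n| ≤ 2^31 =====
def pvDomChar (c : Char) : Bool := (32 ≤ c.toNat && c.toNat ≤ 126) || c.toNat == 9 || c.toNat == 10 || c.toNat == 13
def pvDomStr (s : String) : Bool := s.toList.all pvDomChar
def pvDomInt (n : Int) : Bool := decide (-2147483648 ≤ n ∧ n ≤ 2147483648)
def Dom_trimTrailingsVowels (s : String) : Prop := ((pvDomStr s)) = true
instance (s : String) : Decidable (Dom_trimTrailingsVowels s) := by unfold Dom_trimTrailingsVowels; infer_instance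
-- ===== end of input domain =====

-- B replaces A's backward index loop popping from a list copy with a single rstrip("aeiou") call (idiomatic).

-- ===== PORT A =====
-- vowels = {"a","e","i","o","u"}
def pvVowelsA : PySem.Set Char := PySem.Set.ofList ['a', 'e', 'i', 'o', 'u']

-- the for-loop over range(len(s_list)-1, -1, -1): the second argument k is i+1,
-- counting the remaining indices down; s_list[i] / s_list.pop(i) via PySem.
def trimA_go : List Char → Nat → List Char
  | l, 0 => l
  | l, k + 1 =>
    match PySem.List.pyGet? l (k : Int) with
    | some c =>
      if pvVowelsA.contains c then
        match PySem.List.pop? l (k : Int) with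
        | some r => trimA_go r.2 k
        | none => l
      else l
    | none => l

def trimTrailingsVowels (s : String) : String :=
  String.ofList (trimA_go s.toList s.toList.length)

-- ===== PORT B =====
-- s.rstrip("aeiou"): drop the longest vowel suffix (ported by hand; exact for ASCII rstrip with an explicit char set)
def pvIsVowelB (c : Char) : Bool := ['a', 'e', 'i', 'o', 'u'].contains c

def trimTrailingsVowels_alt (s : String) : String :=
  String.ofList ((s.toList.reverse.dropWhile pvIsVowelB).reverse)

-- ===== PRECONDITION & SPEC =====
def Spec_trimTrailingsVowels (s : String) (out : String) : Prop := out = trimTrailingsVowels_alt s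
instance (s : String) (out : String) : Decidable (Spec_trimTrailingsVowels s out) := by unfold Spec_trimTrailingsVowels; infer_instance

-- ===== CLAIM (what is proved, stated in full; the proofs are below) =====
def Claim_equal_trimTrailingsVowels : Prop := ∀ (s : String), Dom_trimTrailingsVowels s → Spec_trimTrailingsVowels s (trimTrailingsVowels s)

-- ===== LEMMAS AND PROOFS =====

theorem pvVowelsA_contains (c : Char) : pvVowelsA.contains c = pvIsVowelB c := by
  rfl

theorem trimA_go_eq (l : List Char) :
    trimA_go l l.length = (l.reverse.dropWhile pvIsVowelB).reverse := by
  induction l using List.reverseRecOn with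
  | nil => rfl
  | append_singleton l x ih =>
    have hlen : (l ++ [x]).length = l.length + 1 := by simp
    rw [hlen]
    have hget : PySem.List.pyGet? (l ++ [x]) (l.length : Int) = some x :=
      PySem.List.pyGet?_append_length (pre := l) (y := x) (ys := [])
    have hpop : PySem.List.pop? (l ++ [x]) (l.length : Int) = some ((l ++ [x])[l.length], (l ++ [x]).eraseIdx l.length) :=
      PySem.List.pop?_natCast (l ++ [x]) l.length (by simp)
    have herase : (l ++ [x]).eraseIdx l.length = l := by
      rw [List.eraseIdx_append_of_length_le (by simp)]; simp
    simp only [trimA_go, hget, pvVowelsA_contains]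
    by_cases hv : pvIsVowelB x
    · simp only [hv, if_pos, hpop, herase, ih]
      simp [hv]
    · simp only [hv, if_neg, Bool.false_eq_true, not_false_iff]
      simp [hv]

-- ===== VERDICT (by name: the statement is the Claim_ definition above) =====
theorem trimTrailingsVowels_spec : Claim_equal_trimTrailingsVowels := by
  intro s _
  unfold Spec_trimTrailingsVowels trimTrailingsVowels trimTrailingsVowels_alt
  rw [trimA_go_eq]
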